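-- pv_equiv track=rewrite | github.com/aneeshb005plr/Ingestion_worker | app/pipeline/table_converter.py | _get_preceding_paragraph
-- ===== SOURCE A (Python) =====
-- def _get_preceding_paragraph(result: list[str]) -> str:
--     """
--     Get the caption/description that immediately precedes the table.
--
--     Priority:
--       1. Last plain text paragraph before the table (ideal)
--       2. Last heading before the table (fallback when table immediately
--          follows a heading with no caption paragraph between them)
--
--     Why fall back to heading:
--       Many tables have this structure:
--         ### 3.2.1 List of components with brief description
--         | Component | Technology | Function |    ← no plain text between
--
--       Without fallback: preceding_context = "" → rows have no context
--       With fallback: preceding_context = "3.2.1 List of components..."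
--       → each row embeds with meaningful context ✅
--     """
--     last_heading = ""
--     for line in reversed(result):
--         stripped = line.strip()
--         if not stripped:
--             continue
--         # Skip italic/bold table captions like *Table 4: ...*
--         if stripped.startswith("*") and stripped.endswith("*"):
--             continue
--         # Skip lines that are already table-converted prose
--         if " | " in stripped and ":" in stripped:
--             continue
--         # Heading — save as fallback but keep looking for plain text
--         if stripped.startswith("#"):
--             if not last_heading:
--                 # Strip markdown # prefix to get clean text
--                 last_heading = stripped.lstrip("#").strip()
--             continue
--         # Plain text paragraph — best option, return immediately
--         return stripped
--
--     # No plain text found — fall back to nearest heading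
--     return last_heading
-- ===== SOURCE B (Python) =====
-- def _get_preceding_paragraph(result: list[str]) -> str:
--     # Forward single pass: keep the last plain paragraph (with a found flag)
--     # and the last heading whose cleaned text is non-empty.
--     last_plain = ""
--     found = False
--     last_heading = ""
--     for line in result:
--         stripped = line.strip()
--         if not stripped:
--             continue
--         if stripped.startswith("*") and stripped.endswith("*"):
--             continue
--         if " | " in stripped and ":" in stripped:
--             continue
--         if stripped.startswith("#"):
--             cleaned = stripped.lstrip("#").strip()
--             if cleaned:
--                 last_heading = cleaned
--             continue
--         last_plain = stripped
--         found = True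
--     return last_plain if found else last_heading
-- ===== Notes on version B (the rewrite author's own statement) =====
-- stated objective: alternative
-- what changed: Replaced A's reversed() scan with an early return by a forward single pass that maintains the last plain paragraph (with a found flag) and the last non-empty cleaned heading, returning after the loop.
import Mathlib
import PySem

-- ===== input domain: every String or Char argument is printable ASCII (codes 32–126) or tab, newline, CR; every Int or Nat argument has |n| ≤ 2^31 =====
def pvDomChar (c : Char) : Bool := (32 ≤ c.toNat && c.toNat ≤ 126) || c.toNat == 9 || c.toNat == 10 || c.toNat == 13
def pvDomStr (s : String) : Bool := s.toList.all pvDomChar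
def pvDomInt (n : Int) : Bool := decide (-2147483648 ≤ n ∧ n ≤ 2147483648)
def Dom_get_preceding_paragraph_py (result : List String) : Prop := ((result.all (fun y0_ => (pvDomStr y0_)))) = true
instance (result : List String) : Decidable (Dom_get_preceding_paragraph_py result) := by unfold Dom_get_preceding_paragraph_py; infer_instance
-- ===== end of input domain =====

-- B replaces A's reversed scan with early return by a forward single pass that
-- maintains the last plain paragraph and last non-empty heading (objective: alternative decomposition).

-- s.lstrip("#"): hand port (PySem has no left-only stripChars); exact — drops leading '#' only.
def pvLstripHash (s : String) : String := String.ofList (s.toList.dropWhile (· == '#'))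

-- ===== PORT A =====
-- A's loop over reversed(result) with early return on a plain-text line.
def pvALoop (ls : List String) (last_heading : String) : String :=
  match ls with
  | [] => last_heading
  | line :: rest =>
    let stripped := PySem.Str.strip line
    if stripped = "" then pvALoop rest last_heading
    else if PySem.Str.startswith stripped "*" && PySem.Str.endswith stripped "*" then
      pvALoop rest last_heading
    else if PySem.Str.isIn " | " stripped && PySem.Str.isIn ":" stripped then
      pvALoop rest last_heading
    else if PySem.Str.startswith stripped "#" then
      pvALoop rest (if last_heading = "" then PySem.Str.strip (pvLstripHash stripped) else last_heading)
    else stripped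

def get_preceding_paragraph_py (result : List String) : String :=
  pvALoop result.reverse ""

-- ===== PORT B =====
-- B's forward pass: state = (last_plain, found, last_heading).
def pvBStep (s : String × Bool × String) (line : String) : String × Bool × String :=
  let stripped := PySem.Str.strip line
  if stripped = "" then s
  else if PySem.Str.startswith stripped "*" && PySem.Str.endswith stripped "*" then s
  else if PySem.Str.isIn " | " stripped && PySem.Str.isIn ":" stripped then s
  else if PySem.Str.startswith stripped "#" then
    let cleaned := PySem.Str.strip (pvLstripHash stripped)
    if cleaned = "" then s else (s.1, s.2.1, cleaned)
  else (stripped, true, s.2.2)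

def get_preceding_paragraph_py_alt (result : List String) : String :=
  let s := result.foldl pvBStep ("", false, "")
  if s.2.1 then s.1 else s.2.2

-- ===== PRECONDITION & SPEC =====
def Spec_get_preceding_paragraph_py (result : List String) (out : String) : Prop := out = get_preceding_paragraph_py_alt result
instance (result : List String) (out : String) : Decidable (Spec_get_preceding_paragraph_py result out) := by unfold Spec_get_preceding_paragraph_py; infer_instance

-- ===== CLAIM (what is proved, stated in full; the proofs are below) =====
def Claim_equal_get_preceding_paragraph_py : Prop := ∀ (result : List String), Dom_get_preceding_paragraph_py result → Spec_get_preceding_paragraph_py result (get_preceding_paragraph_py result)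

-- ===== LEMMAS AND PROOFS =====

-- Reading off A's answer from B's fold state, for an arbitrary pending heading h.
def pvFin (s : String × Bool × String) (h : String) : String :=
  if s.2.1 then s.1 else if h = "" then s.2.2 else h

theorem pvALoop_eq_fold (ls : List String) :
    ∀ h, pvALoop ls h = pvFin (ls.reverse.foldl pvBStep ("", false, "")) h := by
  induction ls with
  | nil => intro h; simp [pvALoop, pvFin]
  | cons line rest ih =>
    intro h
    rw [List.reverse_cons, List.foldl_append, List.foldl_cons, List.foldl_nil]
    set S := List.foldl pvBStep ("", false, "") rest.reverse with hS
    unfold pvALoop pvBStep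
    set stripped := PySem.Str.strip line with hstr
    by_cases h1 : stripped = ""
    · rw [if_pos h1, if_pos h1]; exact ih h
    · rw [if_neg h1, if_neg h1]
      by_cases h2 : (PySem.Str.startswith stripped "*" && PySem.Str.endswith stripped "*") = true
      · rw [if_pos h2, if_pos h2]; exact ih h
      · rw [if_neg h2, if_neg h2]
        by_cases h3 : (PySem.Str.isIn " | " stripped && PySem.Str.isIn ":" stripped) = true
        · rw [if_pos h3, if_pos h3]; exact ih h
        · rw [if_neg h3, if_neg h3]
          by_cases h4 : PySem.Str.startswith stripped "#" = true
          · rw [if_pos h4, if_pos h4, ih]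
            set cleaned := PySem.Str.strip (pvLstripHash stripped) with hc0
            by_cases hc : cleaned = ""
            · by_cases hh : h = "" <;> simp [pvFin, hc, hh]
            · by_cases hh : h = "" <;> simp [pvFin, hc, hh]
          · rw [if_neg h4, if_neg h4]
            simp [pvFin]

-- ===== VERDICT (by name: the statement is the Claim_ definition above) =====
theorem get_preceding_paragraph_py_spec : Claim_equal_get_preceding_paragraph_py := by
  intro result _
  unfold Spec_get_preceding_paragraph_py get_preceding_paragraph_py get_preceding_paragraph_py_alt
  rw [pvALoop_eq_fold]
  simp [pvFin]
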